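-- pv_equiv track=rewrite | github.com/Ronelc/Intro | ex2/temperature.py | is_it_summer_yet
-- ===== SOURCE A (Python) =====
-- def is_it_summer_yet(temp0, temp1, temp2, temp3):
--     a = [temp1, temp2, temp3]
--     i = 0
--     for j in a:
--         if j>temp0:
--             i+=1
--     if i>=2:
--         return True
--     return False
-- ===== SOURCE B (Python) =====
-- def is_it_summer_yet(temp0, temp1, temp2, temp3):
--     # At least two of the three temps exceed temp0  <=>  the median of the
--     # three temps exceeds temp0 (sort, take the middle element).
--     return sorted([temp1, temp2, temp3])[1] > temp0
-- ===== Notes on version B (the rewrite author's own statement) =====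
-- stated objective: alternative
-- what changed: Replaced the counting loop over the three comparisons by a sort-then-median test: sort the three temps and compare the middle element with temp0 (majority exceeds iff the median exceeds).
import Mathlib
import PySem

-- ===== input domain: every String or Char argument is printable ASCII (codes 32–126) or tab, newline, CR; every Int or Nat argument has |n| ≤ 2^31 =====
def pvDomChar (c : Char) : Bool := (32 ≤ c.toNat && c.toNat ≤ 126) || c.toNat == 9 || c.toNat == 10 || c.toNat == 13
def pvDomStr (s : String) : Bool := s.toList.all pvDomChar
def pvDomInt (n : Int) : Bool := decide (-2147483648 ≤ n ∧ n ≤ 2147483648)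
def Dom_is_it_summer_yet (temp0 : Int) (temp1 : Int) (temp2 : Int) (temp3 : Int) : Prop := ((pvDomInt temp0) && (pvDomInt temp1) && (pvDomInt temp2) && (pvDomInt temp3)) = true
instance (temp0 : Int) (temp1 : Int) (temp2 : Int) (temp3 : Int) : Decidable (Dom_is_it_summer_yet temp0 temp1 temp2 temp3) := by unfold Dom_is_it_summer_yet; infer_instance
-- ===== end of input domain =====

-- B replaces A's counting loop over the three comparisons by sorting the three temps and comparing the median to temp0 (alternative algorithm).


-- ===== PORT A =====
-- Port of A: fold over the list [temp1,temp2,temp3] maintaining counter i, then test i >= 2.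
def is_it_summer_yet (temp0 : Int) (temp1 : Int) (temp2 : Int) (temp3 : Int) : Bool :=
  let a := [temp1, temp2, temp3]
  let i := a.foldl (fun i j => if j > temp0 then i + 1 else i) (0 : Int)
  if i ≥ 2 then true else false

-- ===== PORT B =====
-- Port of B: sort the three temps (Python sorted), take index 1 (the median) and
-- compare it with temp0.  The index is always in range for a 3-element list, so
-- the none branch of pyGet? is unreachable (Python would raise IndexError there).
def is_it_summer_yet_alt (temp0 : Int) (temp1 : Int) (temp2 : Int) (temp3 : Int) : Bool :=
  match PySem.List.pyGet? (PySem.List.sorted [temp1, temp2, temp3] (fun x => x) false) 1 with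
  | some m => decide (m > temp0)
  | none => false

-- ===== PRECONDITION & SPEC =====
def Spec_is_it_summer_yet (temp0 : Int) (temp1 : Int) (temp2 : Int) (temp3 : Int) (out : Bool) : Prop := out = is_it_summer_yet_alt temp0 temp1 temp2 temp3
instance (temp0 : Int) (temp1 : Int) (temp2 : Int) (temp3 : Int) (out : Bool) : Decidable (Spec_is_it_summer_yet temp0 temp1 temp2 temp3 out) := by unfold Spec_is_it_summer_yet; infer_instance

-- ===== CLAIM (what is proved, stated in full; the proofs are below) =====
def Claim_equal_is_it_summer_yet : Prop := ∀ (temp0 : Int) (temp1 : Int) (temp2 : Int) (temp3 : Int), Dom_is_it_summer_yet temp0 temp1 temp2 temp3 → Spec_is_it_summer_yet temp0 temp1 temp2 temp3 (is_it_summer_yet temp0 temp1 temp2 temp3)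

-- ===== LEMMAS AND PROOFS =====

-- ===== VERDICT (by name: the statement is the Claim_ definition above) =====
theorem is_it_summer_yet_spec : Claim_equal_is_it_summer_yet := by
  intro t0 t1 t2 t3 _
  unfold Spec_is_it_summer_yet is_it_summer_yet is_it_summer_yet_alt
  simp only [List.foldl]
  by_cases h12 : t2 < t1 <;> by_cases h13 : t3 < t1 <;> by_cases h23 : t3 < t2 <;>
    simp [PySem.List.sorted, PySem.List.insertBy, PySem.List.pyGet?, PySem.List.pyIdx?,
      h12, h13, h23] <;>
    by_cases h1 : t1 > t0 <;> by_cases h2 : t2 > t0 <;> by_cases h3 : t3 > t0 <;>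
    simp [h1, h2, h3] <;> omega
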